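-- pv_equiv track=rewrite | github.com/hjs0522/Algorithm | 캐시.py | solution
-- ===== SOURCE A (Python) =====
-- def solution(cacheSize, cities):
--     answer = 0
--     q = []
--     if cacheSize == 0:
--         return len(cities)*5
--     for c in cities:
--         c = c.lower()
--         if c in q:
--             if q:
--                 q.pop(q.index(c))
--             q.append(c)
--             answer+=1
--         else:
--             if len(q) == cacheSize:
--                 q.pop(0)
--             q.append(c)
--             answer+=5
--     return answer
-- ===== SOURCE B (Python) =====
-- def solution(cacheSize, cities):
--     # Reuse-distance formulation: an access is a hit (cost 1) iff the city occurred
--     # before and fewer than cacheSize distinct cities were accessed since its last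
--     # occurrence; otherwise it costs 5. No cache is simulated: each access scans the
--     # history backwards, stopping at the previous occurrence or at cacheSize distinct
--     # cities (beyond that it is a miss regardless).
--     if cacheSize == 0:
--         return len(cities) * 5
--     answer = 0
--     seen = []  # lowercased accesses so far, in order
--     for city in cities:
--         c = city.lower()
--         recent = set()
--         hit = False
--         for x in reversed(seen):
--             if x == c:
--                 hit = True
--                 break
--             recent.add(x)
--             if len(recent) == cacheSize:
--                 break
--         answer += 1 if hit and len(recent) < cacheSize else 5
--         seen.append(c)
--     return answer
-- ===== Notes on version B (the rewrite author's own statement) =====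
-- stated objective: alternative
-- what changed: Replaces A's simulated LRU queue (membership scan, index/pop move-to-end, pop(0) eviction) by a stateless reuse-distance computation: for each access, scan the access history backwards and count the distinct cities since the previous occurrence; it is a hit iff that count is below cacheSize, and no cache is ever maintained.
-- outside the precondition, e.g. on solution(-1, ['b', 'b']): A returns 6, B returns 10
import Mathlib
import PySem

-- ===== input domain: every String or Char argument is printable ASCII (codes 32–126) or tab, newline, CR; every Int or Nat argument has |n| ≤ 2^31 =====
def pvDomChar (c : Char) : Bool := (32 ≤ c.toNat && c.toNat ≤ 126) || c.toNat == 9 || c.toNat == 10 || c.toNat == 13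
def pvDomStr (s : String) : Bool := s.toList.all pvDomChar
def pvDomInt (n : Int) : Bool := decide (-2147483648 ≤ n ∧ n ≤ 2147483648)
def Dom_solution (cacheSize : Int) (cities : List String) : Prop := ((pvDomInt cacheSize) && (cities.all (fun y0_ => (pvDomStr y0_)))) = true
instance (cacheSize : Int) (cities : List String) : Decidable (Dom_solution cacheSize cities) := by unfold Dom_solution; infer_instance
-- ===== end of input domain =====

-- B drops the cache simulation entirely: an access is a hit iff the city occurred before and
-- fewer than cacheSize distinct cities were accessed since its last occurrence (reuse distance).

-- ===== PORT A =====
-- loop body of A: lowercase, move-to-end on hit, evict q[0] on miss with full cache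
def solutionStepA (cacheSize : Int) (st : List String × Int) (c0 : String) : List String × Int :=
  let q := st.1
  let answer := st.2
  let c := PySem.Str.lower c0
  if q.contains c then
    let q1 :=
      if !q.isEmpty then
        match PySem.List.index? q c with
        | some i =>
          match PySem.List.pop? q (i : Int) with
          | some r => r.2
          | none => q
        | none => q
      else q
    (q1 ++ [c], answer + 1)
  else
    let q1 :=
      if (PySem.List.len q) == cacheSize then
        match PySem.List.pop? q 0 with
        | some r => r.2
        | none => q
      else q
    (q1 ++ [c], answer + 5)

def solution (cacheSize : Int) (cities : List String) : Int :=
  if cacheSize == 0 then (PySem.List.len cities) * 5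
  else (cities.foldl (solutionStepA cacheSize) ([], 0)).2

-- ===== PORT B =====
-- inner loop of B: walk the previous accesses from most recent, collecting the distinct
-- cities seen, until the current city is found (hit), cacheSize distinct cities have been
-- collected (miss regardless), or the history is exhausted (miss)
def scanRecent (cacheSize : Int) (c : String) :
    List String → PySem.Set String → Bool × PySem.Set String
  | [], recent => (false, recent)
  | x :: rest, recent =>
    if x == c then (true, recent)
    else
      let recent' := PySem.Set.add recent x
      if PySem.Set.len recent' == cacheSize then (false, recent')
      else scanRecent cacheSize c rest recent'

-- loop body of B: score 1 if hit within fewer than cacheSize distinct cities, else 5; record access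
def solutionStepB (cacheSize : Int) (st : List String × Int) (city : String) : List String × Int :=
  let seen := st.1
  let c := PySem.Str.lower city
  let r := scanRecent cacheSize c seen.reverse PySem.Set.empty
  (seen ++ [c], st.2 + (if r.1 ∧ PySem.Set.len r.2 < cacheSize then 1 else 5))

def solution_alt (cacheSize : Int) (cities : List String) : Int :=
  if cacheSize == 0 then (PySem.List.len cities) * 5
  else (cities.foldl (solutionStepB cacheSize) ([], 0)).2

-- ===== PRECONDITION & SPEC =====
-- Pre_ excludes negative cacheSize (outside the task's natural domain): there A behaves as an
-- unbounded cache (repeats hit) while B's distinct-count test never passes (every access misses).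
def Pre_solution (cacheSize : Int) (cities : List String) : Prop := 0 ≤ cacheSize
instance (cacheSize : Int) (cities : List String) : Decidable (Pre_solution cacheSize cities) := by unfold Pre_solution; infer_instance
def pvWitness_solution : Int × List String := (2, ["Seoul", "B", "seoul", "A", "b"])

def Spec_solution (cacheSize : Int) (cities : List String) (out : Int) : Prop := out = solution_alt cacheSize cities
instance (cacheSize : Int) (cities : List String) (out : Int) : Decidable (Spec_solution cacheSize cities out) := by unfold Spec_solution; infer_instance

-- ===== CLAIM (what is proved, stated in full; the proofs are below) =====
def Claim_equal_solution : Prop := ∀ (cacheSize : Int) (cities : List String), Dom_solution cacheSize cities → Pre_solution cacheSize cities → Spec_solution cacheSize cities (solution cacheSize cities)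

-- ===== LEMMAS AND PROOFS =====

-- A's cache after history `seen`: the (up to kn) most recently used distinct cities,
-- least recent first = the last kn entries of Mathlib's last-occurrence dedup of `seen`
def lruQ (kn : Nat) (seen : List String) : List String :=
  (seen.dedup).drop (seen.dedup.length - kn)

theorem dedup_snoc (s : List String) (c : String) :
    (s ++ [c]).dedup = s.dedup.erase c ++ [c] := by
  induction s with
  | nil => simp
  | cons a s ih =>
    by_cases ha : a ∈ s ++ [c]
    · rw [List.cons_append, List.dedup_cons_of_mem ha, ih]
      by_cases has : a ∈ s
      · rw [List.dedup_cons_of_mem has]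
      · have hac : a = c := by
          rcases List.mem_append.1 ha with h | h
          · exact absurd h has
          · simpa using h
        subst hac
        rw [List.dedup_cons_of_notMem has, List.erase_cons_head,
          List.erase_of_not_mem (by simpa using has)]
    · have has : a ∉ s := fun h => ha (List.mem_append.2 (Or.inl h))
      have hac : a ≠ c := fun h => ha (by simp [h])
      rw [List.cons_append, List.dedup_cons_of_notMem ha, ih,
        List.dedup_cons_of_notMem has, List.erase_cons_tail (by simpa using hac)]
      simp

theorem dedup_middle (u v : List String) (c : String) (hcv : c ∉ v) :
    ∃ w, (u ++ c :: v).dedup = w ++ c :: v.dedup ∧ c ∉ w := by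
  induction u with
  | nil =>
    exact ⟨[], by simp [List.dedup_cons_of_notMem hcv], by simp⟩
  | cons a u ih =>
    obtain ⟨w, hw, hcw⟩ := ih
    by_cases ha : a ∈ u ++ c :: v
    · exact ⟨w, by rw [List.cons_append, List.dedup_cons_of_mem ha, hw], hcw⟩
    · refine ⟨a :: w, ?_, ?_⟩
      · rw [List.cons_append, List.dedup_cons_of_notMem ha, hw]; simp
      · have hac : a ≠ c := fun h => ha (by simp [h])
        intro h
        rcases List.mem_cons.1 h with h2 | h2
        · exact hac h2.symm
        · exact hcw h2

theorem mem_drop_middle (w t : List String) (c : String) (m : Nat)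
    (hnd : (w ++ c :: t).Nodup) : c ∈ (w ++ c :: t).drop m ↔ m ≤ w.length := by
  constructor
  · intro hc
    by_contra hm
    push_neg at hm
    have hct : c ∉ t := by
      have := (List.nodup_append.1 hnd).2.1
      exact (List.nodup_cons.1 this).1
    obtain ⟨r, hr⟩ : ∃ r, m = w.length + 1 + r := ⟨m - (w.length + 1), by omega⟩
    rw [hr, List.drop_append] at hc
    have h1 : (w.drop (w.length + 1 + r)) = [] := by
      apply List.drop_eq_nil_of_le; omega
    rw [h1, List.nil_append] at hc
    have h2 : w.length + 1 + r - w.length = r + 1 := by omega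
    rw [h2, List.drop_succ_cons] at hc
    exact hct (List.drop_subset _ _ hc)
  · intro hm
    rw [List.drop_append_of_le_length hm]
    simp

theorem nodup_len_eq (xs ys : List String) (h1 : xs.Nodup) (h2 : ys.Nodup)
    (h : ∀ x, x ∈ xs ↔ x ∈ ys) : xs.length = ys.length :=
  ((List.perm_ext_iff_of_nodup h1 h2).2 h).length_eq

-- proof-side: the unbounded scan (no capacity cut-off)
def scanFull (c : String) : List String → PySem.Set String → Bool × PySem.Set String
  | [], recent => (false, recent)
  | x :: rest, recent =>
    if x == c then (true, recent) else scanFull c rest (PySem.Set.add recent x)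

theorem len_add_bounds (acc : PySem.Set String) (x : String) :
    PySem.Set.len acc ≤ PySem.Set.len (PySem.Set.add acc x) ∧
      PySem.Set.len (PySem.Set.add acc x) ≤ PySem.Set.len acc + 1 := by
  rw [PySem.Set.add_eq_ite]
  split_ifs with h
  · omega
  · simp [PySem.Set.len]

theorem scanFull_len_mono (c : String) (l : List String) (acc : PySem.Set String) :
    PySem.Set.len acc ≤ PySem.Set.len (scanFull c l acc).2 := by
  induction l generalizing acc with
  | nil => simp [scanFull]
  | cons x rest ih =>
    rw [scanFull]
    split_ifs with h
    · simp
    · have h1 := (len_add_bounds acc x).1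
      have h2 := ih (PySem.Set.add acc x)
      omega

theorem scanRecent_fst_notMem (cacheSize : Int) (c : String) (l : List String)
    (acc : PySem.Set String) (hc : c ∉ l) : (scanRecent cacheSize c l acc).1 = false := by
  induction l generalizing acc with
  | nil => rfl
  | cons x rest ih =>
    have hxc : (x == c) = false := by
      apply beq_eq_false_iff_ne.2
      rintro rfl
      exact hc (by simp)
    rw [scanRecent, hxc]
    simp only [Bool.false_eq_true, if_false]
    split_ifs with h
    · rfl
    · exact ih _ (fun h2 => hc (List.mem_cons_of_mem _ h2))

-- below capacity, the bounded scan's hit test agrees with the unbounded scan's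
theorem scan_cond_eq (cacheSize : Int) (c : String) (l : List String)
    (acc : PySem.Set String) (hacc : PySem.Set.len acc < cacheSize) :
    (((scanRecent cacheSize c l acc).1 = true ∧
        PySem.Set.len (scanRecent cacheSize c l acc).2 < cacheSize) ↔
      ((scanFull c l acc).1 = true ∧
        PySem.Set.len (scanFull c l acc).2 < cacheSize)) := by
  induction l generalizing acc with
  | nil => rw [scanRecent, scanFull]
  | cons x rest ih =>
    rw [scanRecent, scanFull]
    by_cases hx : (x == c) = true
    · rw [hx]; simp
    · rw [Bool.not_eq_true] at hx
      rw [hx]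
      simp only [Bool.false_eq_true, if_false]
      by_cases hcap : (PySem.Set.len (PySem.Set.add acc x) == cacheSize) = true
      · rw [if_pos hcap]
        rw [beq_iff_eq] at hcap
        have hmono := scanFull_len_mono c rest (PySem.Set.add acc x)
        constructor
        · rintro ⟨h1, _⟩; exact absurd h1 (by simp)
        · rintro ⟨_, h2⟩; omega
      · rw [if_neg hcap]
        rw [beq_iff_eq] at hcap
        have hb := (len_add_bounds acc x).2
        exact ih (PySem.Set.add acc x) (by omega)

theorem scan_mem (c : String) (s t : List String) (acc : PySem.Set String) (hcs : c ∉ s) :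
    scanFull c (s ++ c :: t) acc = (true, s.foldl PySem.Set.add acc) := by
  induction s generalizing acc with
  | nil => simp [scanFull]
  | cons x rest ih =>
    have hxc : (x == c) = false := by
      apply beq_eq_false_iff_ne.2
      rintro rfl
      exact hcs (by simp)
    rw [List.cons_append, scanFull, hxc]
    simp only [Bool.false_eq_true, if_false, List.foldl_cons]
    exact ih _ (fun h => hcs (List.mem_cons_of_mem _ h))

theorem first_split (c : String) : ∀ (l : List String), c ∈ l →
    ∃ s t, l = s ++ c :: t ∧ c ∉ s := by
  intro l
  induction l with
  | nil => intro h; simp at h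
  | cons a rest ih =>
    intro h
    by_cases hac : a = c
    · exact ⟨[], rest, by rw [hac]; rfl, by simp⟩
    · have : c ∈ rest := by
        rcases List.mem_cons.1 h with h2 | h2
        · exact absurd h2.symm hac
        · exact h2
      obtain ⟨s, t, hst, hcs⟩ := ih this
      refine ⟨a :: s, t, by rw [hst]; rfl, ?_⟩
      intro h2
      rcases List.mem_cons.1 h2 with h3 | h3
      · exact hac h3.symm
      · exact hcs h3

theorem eraseIdx_append_cons (pre suf : List String) (c : String) :
    (pre ++ c :: suf).eraseIdx pre.length = pre ++ suf := by
  induction pre with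
  | nil => simp
  | cons x xs ih => simp [ih]

-- A's hit-branch queue update is q.erase c followed by append
theorem eraseBlock_eq (q : List String) (c : String) (hc : c ∈ q) :
    (if !q.isEmpty then
       match PySem.List.index? q c with
       | some i =>
         match PySem.List.pop? q (i : Int) with
         | some r => r.2
         | none => q
       | none => q
     else q) = q.erase c := by
  have hne : q ≠ [] := by rintro rfl; simp at hc
  rw [if_pos (by simpa using hne)]
  cases hidx : PySem.List.index? q c with
  | none =>
    exfalso
    have h2 := (PySem.List.index?_isSome_iff q c).2 hc
    rw [hidx] at h2; simp at h2
  | some i =>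
    obtain ⟨pre, suf, rfl, rfl, hnp⟩ := (PySem.List.index?_eq_some_iff q c i).1 hidx
    dsimp only
    rw [PySem.List.pop?_natCast _ _ (by simp)]
    have h1 := eraseIdx_append_cons pre suf c
    have h2 : (pre ++ c :: suf).erase c = pre ++ suf := by
      simp [List.erase_append_right _ hnp]
    simp [h1, h2]

-- one access: A's step on the reconstructed cache matches B's reuse-distance step
theorem step_corr (cacheSize : Int) (kn : Nat) (hkn : kn = cacheSize.toNat)
    (h1 : 1 ≤ cacheSize) (seen : List String) (a : Int) (city : String) :
    solutionStepA cacheSize (lruQ kn seen, a) city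
      = (lruQ kn (seen ++ [PySem.Str.lower city]),
         (solutionStepB cacheSize (seen, a) city).2) := by
  simp only [lruQ]
  have hkn1 : 1 ≤ kn := by rw [hkn]; omega
  have hknI : (kn : Int) = cacheSize := by rw [hkn]; exact Int.toNat_of_nonneg (by omega)
  clear hkn
  set c := PySem.Str.lower city with hc
  have hD' : (seen ++ [c]).dedup = seen.dedup.erase c ++ [c] := dedup_snoc seen c
  set D := seen.dedup with hD
  rw [hD']
  have hNd : D.Nodup := by rw [hD]; exact seen.nodup_dedup
  set q : List String := D.drop (D.length - kn) with hq
  have hqlen : q.length = D.length - (D.length - kn) := by rw [hq, List.length_drop]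
  by_cases hcs : c ∈ seen
  · -- c occurred before: split the history at its last occurrence
    obtain ⟨s, t, hst, hcns⟩ := first_split c seen.reverse (by simpa using hcs)
    have hseen : seen = t.reverse ++ c :: s.reverse := by
      have := congrArg List.reverse hst
      simpa using this
    have hcv : c ∉ s.reverse := by simpa using hcns
    obtain ⟨w, hw, hcw⟩ := dedup_middle t.reverse s.reverse c hcv
    have hDw : D = w ++ c :: s.reverse.dedup := by rw [hD, hseen]; exact hw
    have hcD : c ∈ D := by rw [hDw]; simp
    have hDpos : 1 ≤ D.length := List.length_pos_of_mem hcD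
    have hLw : (w ++ c :: s.reverse.dedup).length = w.length + 1 + s.reverse.dedup.length := by
      simp; omega
    have hDlen : D.length = w.length + 1 + s.reverse.dedup.length := by rw [hDw]; exact hLw
    -- B's scan result
    have hscan : scanFull c seen.reverse PySem.Set.empty
        = (true, s.foldl PySem.Set.add PySem.Set.empty) := by
      rw [hst]; exact scan_mem c s t _ hcns
    have hrecent : s.foldl PySem.Set.add PySem.Set.empty = PySem.Set.ofList s := by
      rw [PySem.Set.ofList_eq_foldl]; rfl
    -- the distinct-count since last occurrence, two ways
    have hcard : (PySem.Set.ofList s).length = s.reverse.dedup.length := by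
      apply nodup_len_eq _ _ (PySem.Set.nodup_ofList s) s.reverse.nodup_dedup
      intro x
      rw [PySem.Set.mem_ofList, List.mem_dedup, List.mem_reverse]
    have hlenS : PySem.Set.len (PySem.Set.ofList s) = ((s.reverse.dedup.length : Nat) : Int) := by
      simp [PySem.Set.len, hcard]
    have hacc0 : PySem.Set.len (PySem.Set.empty : PySem.Set String) < cacheSize := by
      simp [PySem.Set.empty, PySem.Set.len]
      omega
    -- B's bounded scan accepts ⟺ reuse distance below capacity
    have hcondB : (((scanRecent cacheSize c seen.reverse PySem.Set.empty).1 = true ∧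
        PySem.Set.len (scanRecent cacheSize c seen.reverse PySem.Set.empty).2 < cacheSize) ↔
        s.reverse.dedup.length < kn) := by
      rw [scan_cond_eq cacheSize c seen.reverse PySem.Set.empty hacc0, hscan, hrecent]
      dsimp only
      rw [hlenS]
      constructor
      · rintro ⟨_, h2⟩; omega
      · intro h; exact ⟨rfl, by omega⟩
    -- hit in A's cache ⟺ reuse distance below capacity
    have hhit : c ∈ q ↔ s.reverse.dedup.length < kn := by
      rw [hq]
      conv_lhs => rw [hDw]
      rw [mem_drop_middle w s.reverse.dedup c _ (hDw ▸ hNd)]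
      rw [← hDw]
      constructor <;> intro h <;> omega
    by_cases hhitq : c ∈ q
    · -- HIT: A moves c to the end, B sees a reuse distance below capacity; both add 1
      have hqc : q.contains c = true := by simpa using hhitq
      rw [solutionStepA, solutionStepB]
      simp only [← hc, hqc, if_true]
      rw [eraseBlock_eq q c hhitq]
      rw [if_pos (hcondB.2 (hhit.1 hhitq))]
      -- queues: q.erase c ++ [c] is the new cache
      have hlenE : (D.erase c ++ [c]).length = D.length := by
        rw [List.length_append, List.length_erase_of_mem hcD]
        simp
        omega
      obtain ⟨P, hPD, hPlen⟩ : ∃ P, D = P ++ q ∧ P.length = D.length - kn :=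
        ⟨D.take (D.length - kn), (List.take_append_drop _ D).symm, by
          rw [List.length_take]; omega⟩
      have hcP : c ∉ P := by
        intro hcp
        have hnd2 : (P ++ q).Nodup := hPD ▸ hNd
        exact (List.nodup_append.1 hnd2).2.2 c hcp c hhitq rfl
      have hQ' : (D.erase c ++ [c]).drop ((D.erase c ++ [c]).length - kn)
          = q.erase c ++ [c] := by
        rw [hlenE]
        have hE : D.erase c = P ++ q.erase c := by
          rw [hPD, List.erase_append_right _ hcP]
        rw [hE, List.append_assoc, List.drop_append, ← hPlen, List.drop_length,
          Nat.sub_self, List.drop_zero, List.nil_append]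
      rw [hQ']
    · -- c occurred before but was evicted: reuse distance at capacity; both add 5
      have hqc : q.contains c = false := by simpa using hhitq
      have hnolt : ¬ s.reverse.dedup.length < kn := fun h => hhitq (hhit.2 h)
      have hgekn : kn ≤ D.length := by omega
      have hqk : q.length = kn := by omega
      have hcondA : (PySem.List.len q == cacheSize) = true := by
        rw [beq_iff_eq, PySem.List.len_eq]
        omega
      obtain ⟨hh, tt, hqe⟩ : ∃ hh tt, q = hh :: tt := by
        apply List.exists_cons_of_ne_nil
        intro h
        rw [h] at hqk
        simp at hqk
        omega
      rw [solutionStepA, solutionStepB]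
      simp only [← hc, hqc, Bool.false_eq_true, if_false, hcondA, if_true]
      rw [hqe, PySem.List.pop?_zero_cons]
      rw [if_neg (fun h => hnolt (hcondB.1 h))]
      dsimp only
      -- queues: drop the least recent and append c
      have hlenE : (D.erase c ++ [c]).length = D.length := by
        rw [List.length_append, List.length_erase_of_mem hcD]
        simp
        omega
      obtain ⟨P, hPD, hPlen⟩ : ∃ P, D = P ++ q ∧ P.length = D.length - kn :=
        ⟨D.take (D.length - kn), (List.take_append_drop _ D).symm, by
          rw [List.length_take]; omega⟩
      have hcP : c ∈ P := by
        have h2 : c ∈ P ++ q := hPD ▸ hcD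
        rcases List.mem_append.1 h2 with h3 | h3
        · exact h3
        · exact absurd h3 hhitq
      have hm1 : 1 ≤ D.length - kn := by
        by_contra hm
        have hP0 : P.length = 0 := by omega
        rw [List.length_eq_zero_iff] at hP0
        rw [hP0] at hcP
        simp at hcP
      have hQ' : (D.erase c ++ [c]).drop ((D.erase c ++ [c]).length - kn) = tt ++ [c] := by
        rw [hlenE]
        have hE : D.erase c = P.erase c ++ q := by
          rw [hPD, List.erase_append_left _ hcP]
        have hPlen' : (P.erase c).length = D.length - kn - 1 := by
          rw [List.length_erase_of_mem hcP, hPlen]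
        rw [hE, List.append_assoc, List.drop_append]
        have hd1 : (P.erase c).drop (D.length - kn) = [] :=
          List.drop_eq_nil_of_le (by omega)
        have hd2 : D.length - kn - (P.erase c).length = 1 := by omega
        rw [hd1, hd2, List.nil_append, hqe, List.cons_append, List.drop_succ_cons,
          List.drop_zero]
      rw [hQ']
  · -- first occurrence of c: B finds no previous access; both add 5
    have hcD : c ∉ D := by rw [hD]; simpa [List.mem_dedup] using hcs
    have hhitq : c ∉ q := fun h => hcD (List.drop_subset _ _ h)
    have hqc : q.contains c = false := by simpa using hhitq
    have hscanN : (scanRecent cacheSize c seen.reverse PySem.Set.empty).1 = false :=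
      scanRecent_fst_notMem cacheSize c seen.reverse _ (by simpa using hcs)
    have hED : D.erase c = D := List.erase_of_not_mem hcD
    rw [solutionStepA, solutionStepB]
    simp only [← hc, hqc, Bool.false_eq_true, if_false, hscanN, false_and, if_false]
    by_cases hkD : kn ≤ D.length
    · -- cache full: evict the front
      have hqk : q.length = kn := by omega
      have hcondA : (PySem.List.len q == cacheSize) = true := by
        rw [beq_iff_eq, PySem.List.len_eq]
        omega
      obtain ⟨hh, tt, hqe⟩ : ∃ hh tt, q = hh :: tt := by
        apply List.exists_cons_of_ne_nil
        intro h
        rw [h] at hqk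
        simp at hqk
        omega
      simp only [hcondA, if_true]
      rw [hqe, PySem.List.pop?_zero_cons]
      dsimp only
      have hQ' : (D.erase c ++ [c]).drop ((D.erase c ++ [c]).length - kn) = tt ++ [c] := by
        rw [hED, List.length_append]
        have hd : D.length + [c].length - kn = 1 + (D.length - kn) := by simp; omega
        rw [hd, List.drop_append]
        have hd1 : D.drop (1 + (D.length - kn)) = tt := by
          have : D.drop (1 + (D.length - kn)) = (D.drop (D.length - kn)).drop 1 := by
            rw [List.drop_drop]
            congr 1
            omega
          rw [this, ← hq, hqe, List.drop_succ_cons, List.drop_zero]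
        have hd2 : 1 + (D.length - kn) - D.length = 0 := by omega
        rw [hd1, hd2, List.drop_zero]
      rw [hQ']
    · -- cache not yet full: plain append
      have h0 : D.length - kn = 0 := by omega
      have hqD : q = D := by rw [hq, h0, List.drop_zero]
      have hDlt : (D.length : Int) < cacheSize := by omega
      have hcondA : (PySem.List.len q == cacheSize) = false := by
        rw [hqD, beq_eq_false_iff_ne, PySem.List.len_eq]
        omega
      simp only [hcondA, Bool.false_eq_true, if_false]
      have hQ' : (D.erase c ++ [c]).drop ((D.erase c ++ [c]).length - kn) = q ++ [c] := by
        rw [hED, hqD]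
        have : (D ++ [c]).length - kn = 0 := by simp; omega
        rw [this, List.drop_zero]
      rw [hQ']

theorem loop_eq (cacheSize : Int) (h1 : 1 ≤ cacheSize) :
    ∀ (cities seen : List String) (a : Int),
      (cities.foldl (solutionStepA cacheSize) (lruQ cacheSize.toNat seen, a)).2
        = (cities.foldl (solutionStepB cacheSize) (seen, a)).2 := by
  intro cities
  induction cities with
  | nil => intro seen a; rfl
  | cons c0 rest ih =>
    intro seen a
    rw [List.foldl_cons, List.foldl_cons, step_corr cacheSize cacheSize.toNat rfl h1 seen a c0]
    exact ih (seen ++ [PySem.Str.lower c0]) ((solutionStepB cacheSize (seen, a) c0).2)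

-- ===== VERDICT (by name: the statement is the Claim_ definition above) =====
theorem solution_spec : Claim_equal_solution := by
  intro cacheSize cities _ hpre
  unfold Spec_solution solution solution_alt
  by_cases h0 : cacheSize = 0
  · simp [h0]
  · have hb : (cacheSize == 0) = false := by simp [h0]
    rw [hb]
    simp only [Bool.false_eq_true, if_false]
    have h1 : 1 ≤ cacheSize := by
      unfold Pre_solution at hpre; omega
    have h2 := loop_eq cacheSize h1 cities [] 0
    simpa [lruQ] using h2
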